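-- pv_equiv track=rewrite | github.com/JRAutomate/DeepChek_NGS_Library_MGISP100 | en-us/DeepChek_NGS_Library_Preparation.py | single_asp_multi
-- ===== SOURCE A (Python) =====
-- def single_asp_multi(samples,number_channels,maximum_capacity=1):
--     #maximum aspiration dispenses per cicle.
--     ch_full = []  # List to store full channel groups
--     rest_samples = samples  # Remaining samples to process
--
--     # Calculate the number of samples that can be processed in this batch
--     batch_capacity = number_channels * maximum_capacity
--
--     while rest_samples >= batch_capacity:
--         ch_full.append(maximum_capacity) # Add a full batch of channels
--         rest_samples -= batch_capacity
--
--     #last channles. inferring capacity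
--     for n in range(maximum_capacity,0,-1):
--         if rest_samples % (n*number_channels)==0 and rest_samples!=0:
--             ch_full.append(n)
--             break
--
--     return ch_full
-- ===== SOURCE B (Python) =====
-- def single_asp_multi(samples, number_channels, maximum_capacity=1):
--     # Closed-form: one divmod replaces the repeated-subtraction while loop.
--     batch_capacity = number_channels * maximum_capacity
--     if samples >= batch_capacity:
--         q, rest = divmod(samples, batch_capacity)
--     else:
--         q, rest = 0, samples
--     ch_full = [maximum_capacity] * q
--     if rest != 0:
--         for n in range(maximum_capacity, 0, -1):
--             if rest % (n * number_channels) == 0: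
--                 ch_full.append(n)
--                 break
--     return ch_full
-- ===== Notes on version B (the rewrite author's own statement) =====
-- stated objective: alternative
-- what changed: The repeated-subtraction while loop computing quotient and remainder is replaced by a single closed-form divmod plus list replication; the descending remainder search is kept.
import Mathlib
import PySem

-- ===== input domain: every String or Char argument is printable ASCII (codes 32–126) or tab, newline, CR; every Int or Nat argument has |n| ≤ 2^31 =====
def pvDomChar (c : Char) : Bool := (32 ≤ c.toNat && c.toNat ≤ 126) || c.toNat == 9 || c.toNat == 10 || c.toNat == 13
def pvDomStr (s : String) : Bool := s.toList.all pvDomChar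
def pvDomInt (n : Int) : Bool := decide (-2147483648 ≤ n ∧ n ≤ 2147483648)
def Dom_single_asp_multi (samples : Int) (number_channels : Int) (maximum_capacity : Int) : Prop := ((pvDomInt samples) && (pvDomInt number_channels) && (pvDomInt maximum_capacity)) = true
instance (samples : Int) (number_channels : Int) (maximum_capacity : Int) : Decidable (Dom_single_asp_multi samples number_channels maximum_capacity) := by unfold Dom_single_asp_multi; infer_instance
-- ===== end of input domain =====

-- B replaces A's repeated-subtraction while loop by one closed-form divmod and list replication; the remainder search is unchanged.

-- ===== PORT A =====
-- the while loop: state (ch_full, rest_samples); the '1 ≤ bc' conjunct is only a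
-- totality guard (in Python the loop diverges when bc ≤ rest and bc ≤ 0; such
-- inputs are excluded by Pre_ below)
def aWhile (ch : List Int) (rest bc mc : Int) : List Int × Int :=
  if _h : bc ≤ rest ∧ 1 ≤ bc then
    aWhile (ch ++ [mc]) (rest - bc) bc mc
  else
    (ch, rest)
termination_by rest.toNat
decreasing_by omega

-- the for-loop over range(maximum_capacity, 0, -1) with its break
def aFor (rest nc : Int) : List Int → List Int
  | [] => []
  | n :: t =>
    if PySem.Int.mod rest (n * nc) = 0 ∧ rest ≠ 0 then [n] else aFor rest nc t

def single_asp_multi (samples : Int) (number_channels : Int) (maximum_capacity : Int) : List Int :=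
  let batch_capacity := number_channels * maximum_capacity
  let s := aWhile [] samples batch_capacity maximum_capacity
  s.1 ++ aFor s.2 number_channels (PySem.List.pyRange maximum_capacity 0 (-1))

-- ===== PORT B =====
def bFind (rest nc : Int) : List Int → List Int
  | [] => []
  | n :: t => if PySem.Int.mod rest (n * nc) = 0 then [n] else bFind rest nc t

def single_asp_multi_alt (samples : Int) (number_channels : Int) (maximum_capacity : Int) : List Int :=
  let batch_capacity := number_channels * maximum_capacity
  let qr : Int × Int :=
    if batch_capacity ≤ samples then
      (PySem.Int.floordiv samples batch_capacity, PySem.Int.mod samples batch_capacity)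
    else (0, samples)
  let ch_full := List.replicate qr.1.toNat maximum_capacity
  if qr.2 ≠ 0 then
    ch_full ++ bFind qr.2 number_channels (PySem.List.pyRange maximum_capacity 0 (-1))
  else ch_full

-- ===== PRECONDITION & SPEC =====
-- Pre_ excludes exactly the inputs on which the Python A does not return: it loops
-- forever when batch_capacity ≤ 0 and samples ≥ batch_capacity, and raises
-- ZeroDivisionError when number_channels = 0 with maximum_capacity ≥ 1 and samples < 0.
def Pre_single_asp_multi (samples : Int) (number_channels : Int) (maximum_capacity : Int) : Prop :=
  (1 ≤ number_channels * maximum_capacity ∨ samples < number_channels * maximum_capacity) ∧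
  ¬ (number_channels = 0 ∧ 1 ≤ maximum_capacity ∧ samples < 0)
instance (samples : Int) (number_channels : Int) (maximum_capacity : Int) : Decidable (Pre_single_asp_multi samples number_channels maximum_capacity) := by unfold Pre_single_asp_multi; infer_instance

def pvWitness_single_asp_multi : Int × Int × Int := (23, 4, 2)

def Spec_single_asp_multi (samples : Int) (number_channels : Int) (maximum_capacity : Int) (out : List Int) : Prop := out = single_asp_multi_alt samples number_channels maximum_capacity
instance (samples : Int) (number_channels : Int) (maximum_capacity : Int) (out : List Int) : Decidable (Spec_single_asp_multi samples number_channels maximum_capacity out) := by unfold Spec_single_asp_multi; infer_instance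

-- ===== CLAIM (what is proved, stated in full; the proofs are below) =====
def Claim_equal_single_asp_multi : Prop := ∀ (samples : Int) (number_channels : Int) (maximum_capacity : Int), Dom_single_asp_multi samples number_channels maximum_capacity → Pre_single_asp_multi samples number_channels maximum_capacity → Spec_single_asp_multi samples number_channels maximum_capacity (single_asp_multi samples number_channels maximum_capacity)

-- ===== LEMMAS AND PROOFS =====

-- the two remainder searches agree (A carries 'rest ≠ 0' inside the loop, B hoists it out)
theorem aFor_eq_bFind (rest nc : Int) (L : List Int) :
    aFor rest nc L = if rest ≠ 0 then bFind rest nc L else [] := by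
  induction L with
  | nil => simp [aFor, bFind]
  | cons n t ih =>
    by_cases h0 : rest = 0
    · subst h0; simp [aFor, ih]
    · simp only [aFor, bFind, h0, ne_eq, not_false_eq_true, if_true, ih]
      split_ifs with h1 h2 h3 <;> simp_all

-- the while loop in closed form, for positive batch capacity
theorem aWhile_closed (ch : List Int) (rest bc mc : Int) (hbc : 1 ≤ bc) :
    aWhile ch rest bc mc =
      (ch ++ List.replicate (if bc ≤ rest then (PySem.Int.floordiv rest bc).toNat else 0) mc,
       if bc ≤ rest then PySem.Int.mod rest bc else rest) := by
  fun_induction aWhile ch rest bc mc with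
  | case1 ch rest h ih =>
    rw [ih]
    have hfd : PySem.Int.floordiv rest bc = rest / bc := PySem.Int.floordiv_eq_ediv_of_pos (by omega)
    have hfd2 : PySem.Int.floordiv (rest - bc) bc = (rest - bc) / bc := PySem.Int.floordiv_eq_ediv_of_pos (by omega)
    have hmd : PySem.Int.mod rest bc = rest % bc := PySem.Int.mod_eq_emod_of_pos (by omega)
    have hmd2 : PySem.Int.mod (rest - bc) bc = (rest - bc) % bc := PySem.Int.mod_eq_emod_of_pos (by omega)
    have hsub_d : (rest - bc) / bc = rest / bc - 1 := by
      rw [show rest - bc = rest + -1 * bc from by ring, Int.add_mul_ediv_right _ _ (by omega : bc ≠ 0)]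
      ring
    have hsub_m : (rest - bc) % bc = rest % bc := Int.sub_emod_right rest bc
    have hone : 1 ≤ rest / bc := by
      have hd := Int.ediv_le_ediv (by omega : (0:ℤ) < bc) h.1
      rwa [Int.ediv_self (by omega : bc ≠ 0)] at hd
    by_cases h2 : bc ≤ rest - bc
    · have hq : (rest / bc).toNat = ((rest - bc) / bc).toNat + 1 := by omega
      simp [if_pos h.1, if_pos h2, hfd, hfd2, hmd, hmd2, hq, hsub_m,
            List.replicate_succ, List.append_assoc]
    · have e1 : (rest - bc) / bc = 0 := Int.ediv_eq_zero_of_lt (by omega) (by omega)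
      have e2 : (rest - bc) % bc = rest - bc := Int.emod_eq_of_lt (by omega) (by omega)
      have hq : rest / bc = 1 := by omega
      have hm3 : rest % bc = rest - bc := by omega
      simp [if_pos h.1, if_neg h2, hfd, hmd, hq, hm3]
  | case2 ch rest h =>
    have hnot : ¬ bc ≤ rest := by omega
    simp [hnot]

-- ===== VERDICT (by name: the statement is the Claim_ definition above) =====
theorem single_asp_multi_spec : Claim_equal_single_asp_multi := by
  intro s nc mc _ hpre
  unfold Spec_single_asp_multi
  simp only [single_asp_multi, single_asp_multi_alt]
  obtain ⟨h1, _⟩ := hpre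
  rcases h1 with hbc | hlt
  · rw [aWhile_closed _ _ _ _ hbc]
    by_cases hle : nc * mc ≤ s
    · simp only [if_pos hle, aFor_eq_bFind]
      split_ifs <;> simp_all
    · simp only [if_neg hle, aFor_eq_bFind]
      split_ifs <;> simp_all
  · rw [aWhile]
    have hng : ¬ (nc * mc ≤ s ∧ 1 ≤ nc * mc) := by omega
    rw [dif_neg hng]
    have hns : ¬ (nc * mc ≤ s) := by omega
    simp only [if_neg hns, aFor_eq_bFind]
    split_ifs <;> simp_all
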